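-- pv_equiv track=rewrite | github.com/Kawser-nerd/CLCDSA | Source Codes/AtCoder/agc027/B/3223368.py | fSearchLowCost
-- ===== SOURCE A (Python) =====
-- def fCeil(iT,iR):
--     return -1 * iT // iR * -1
--
-- def fCalcCost(iN,iX,aCum,iK):
--     iCost = (iN + iK ) * iX + 5 * aCum[iN]
--     for i in range(2,fCeil(iN,iK) ):
--         iCost += 2 * aCum[iN - i * iK ]
--     return iCost
--
-- def fSearchLowCost(iL,iLCost,iU,iUCost,iN,iX,aCum):
--     if iU - iL <= iX :
--         iTotalCost = min(iLCost,iUCost)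
--         for iK in range(iL+1,iU) :
--             iTotalCost = min(iTotalCost,fCalcCost(iN,iX,aCum,iK))
--         return iTotalCost
--     else:
--         iM = (iU + iL) // 2
--         iMCost = fCalcCost(iN,iX,aCum,iM)
--         if iLCost < iUCost :
--             return fSearchLowCost(iL,iLCost,iM,iMCost,iN,iX,aCum)
--         else :
--             return fSearchLowCost(iM,iMCost,iU,iUCost,iN,iX,aCum)
-- ===== SOURCE B (Python) =====
-- def fCeil(iT,iR):
--     return -1 * iT // iR * -1
--
-- def fCalcCost(iN,iX,aCum,iK):
--     iCost = (iN + iK ) * iX + 5 * aCum[iN]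
--     for i in range(2,fCeil(iN,iK) ):
--         iCost += 2 * aCum[iN - i * iK ]
--     return iCost
--
-- def fSearchLowCost(iL,iLCost,iU,iUCost,iN,iX,aCum):
--     # iterative bracket narrowing instead of tail recursion
--     while iU - iL > iX:
--         iM = (iU + iL) // 2
--         iMCost = fCalcCost(iN,iX,aCum,iM)
--         if iLCost < iUCost:
--             iU, iUCost = iM, iMCost
--         else:
--             iL, iLCost = iM, iMCost
--     return min([iLCost, iUCost] + [fCalcCost(iN,iX,aCum,iK) for iK in range(iL+1,iU)])
-- ===== Notes on version B (the rewrite author's own statement) =====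
-- stated objective: idiomatic
-- what changed: The tail recursion over the bracket (iL,iLCost,iU,iUCost) becomes an explicit while-loop mutating those four variables, and the final sequential min-accumulator scan becomes a single min() over a list of the two endpoint costs plus the comprehension of interior costs.
-- outside the precondition, e.g. on fSearchLowCost(-6, 5, -4, 7, -2, 1, [1, 2, 3, 4]): A returns 5, B returns 5
import Mathlib
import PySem

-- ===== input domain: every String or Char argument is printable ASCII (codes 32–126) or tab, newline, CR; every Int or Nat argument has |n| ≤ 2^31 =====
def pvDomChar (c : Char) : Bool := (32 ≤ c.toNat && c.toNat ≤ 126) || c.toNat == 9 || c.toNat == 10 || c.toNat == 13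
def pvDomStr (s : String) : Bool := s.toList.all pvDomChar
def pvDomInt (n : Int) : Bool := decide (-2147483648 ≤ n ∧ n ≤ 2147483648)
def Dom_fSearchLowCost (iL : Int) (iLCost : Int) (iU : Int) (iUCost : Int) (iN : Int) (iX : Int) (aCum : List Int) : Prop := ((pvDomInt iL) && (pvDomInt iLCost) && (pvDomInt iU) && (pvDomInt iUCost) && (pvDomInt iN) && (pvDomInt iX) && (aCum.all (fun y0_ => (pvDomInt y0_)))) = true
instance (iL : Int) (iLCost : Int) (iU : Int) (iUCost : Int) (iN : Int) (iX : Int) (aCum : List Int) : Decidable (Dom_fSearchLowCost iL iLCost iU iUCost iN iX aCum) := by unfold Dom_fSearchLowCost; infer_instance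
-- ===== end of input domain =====

-- B rewrites A's tail recursion as an explicit while-loop over the bracket plus one min()
-- over a list of candidate costs (objective: idiomatic; same cost).

-- ===== PORT A =====
def fCeil (iT : Int) (iR : Int) : Int := PySem.Int.floordiv (-1 * iT) iR * -1

-- aCum[...] ported with pyGetD (default 0); Pre_ restricts to inputs where the index is in
-- range and the divisor iK is nonzero, exactly where Python returns.
def fCalcCost (iN : Int) (iX : Int) (aCum : List Int) (iK : Int) : Int :=
  (PySem.List.pyRange 2 (fCeil iN iK) 1).foldl
    (fun iCost i => iCost + 2 * PySem.List.pyGetD aCum (iN - i * iK) 0)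
    ((iN + iK) * iX + 5 * PySem.List.pyGetD aCum iN 0)

def fSearchLowCost (iL : Int) (iLCost : Int) (iU : Int) (iUCost : Int) (iN : Int) (iX : Int) (aCum : List Int) : Int :=
  if iU - iL ≤ iX then
    (PySem.List.pyRange (iL + 1) iU 1).foldl
      (fun iTotalCost iK => min iTotalCost (fCalcCost iN iX aCum iK)) (min iLCost iUCost)
  else
    let iM := PySem.Int.floordiv (iU + iL) 2
    let iMCost := fCalcCost iN iX aCum iM
    -- totality guard: Python recurses unconditionally and diverges when the bracket
    -- cannot shrink (only possible for iX ≤ 0, excluded by Pre_)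
    if _h : iL < iM ∧ iM < iU then
      if iLCost < iUCost then fSearchLowCost iL iLCost iM iMCost iN iX aCum
      else fSearchLowCost iM iMCost iU iUCost iN iX aCum
    else 0
termination_by (iU - iL).toNat
decreasing_by all_goals omega

-- ===== PORT B =====
-- the while-loop: narrow the bracket until iU - iL ≤ iX, returning the final state
def bracketLoop (iL : Int) (iLCost : Int) (iU : Int) (iUCost : Int) (iN : Int) (iX : Int) (aCum : List Int) : Int × Int × Int × Int :=
  if iU - iL ≤ iX then (iL, iLCost, iU, iUCost)
  else
    let iM := PySem.Int.floordiv (iU + iL) 2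
    let iMCost := fCalcCost iN iX aCum iM
    -- totality guard for the same divergent (iX ≤ 0) inputs, excluded by Pre_
    if _h : iL < iM ∧ iM < iU then
      if iLCost < iUCost then bracketLoop iL iLCost iM iMCost iN iX aCum
      else bracketLoop iM iMCost iU iUCost iN iX aCum
    else (iL, iLCost, iU, iUCost)
termination_by (iU - iL).toNat
decreasing_by all_goals omega

def fSearchLowCost_alt (iL : Int) (iLCost : Int) (iU : Int) (iUCost : Int) (iN : Int) (iX : Int) (aCum : List Int) : Int :=
  let s := bracketLoop iL iLCost iU iUCost iN iX aCum
  -- min([iLCost, iUCost] + [fCalcCost(...) for iK in range(iL+1, iU)])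
  (((PySem.List.pyRange (s.1 + 1) s.2.2.1 1).map (fCalcCost iN iX aCum))).foldl min
    (min s.2.1 s.2.2.2)

-- ===== PRECONDITION & SPEC =====
-- Pre_ excludes inputs on which Python A raises (IndexError from aCum[iN]/aCum[iN-i*iK],
-- ZeroDivisionError from fCeil when some probed iK is 0) or diverges (the bracket cannot
-- shrink when iX ≤ 0); it keeps the immediate-return brackets plus every bracket with
-- positive interior iK, a valid index iN and iX ≥ 1, where every examined index is in range.
-- It is slightly narrower than the crash set on some negative brackets (see the cite), where
-- A and B still agree.
def Pre_fSearchLowCost (iL : Int) (iLCost : Int) (iU : Int) (iUCost : Int) (iN : Int) (iX : Int) (aCum : List Int) : Prop :=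
  (iU - iL ≤ iX ∧ iU ≤ iL + 1) ∨
  (1 ≤ iX ∧ 0 ≤ iL ∧ 0 ≤ iN ∧ iN < (aCum.length : Int))
instance (iL : Int) (iLCost : Int) (iU : Int) (iUCost : Int) (iN : Int) (iX : Int) (aCum : List Int) : Decidable (Pre_fSearchLowCost iL iLCost iU iUCost iN iX aCum) := by unfold Pre_fSearchLowCost; infer_instance

def pvWitness_fSearchLowCost : Int × Int × Int × Int × Int × Int × List Int := (1, 20, 6, 30, 3, 2, [0, 1, 3, 6])

def Spec_fSearchLowCost (iL : Int) (iLCost : Int) (iU : Int) (iUCost : Int) (iN : Int) (iX : Int) (aCum : List Int) (out : Int) : Prop := out = fSearchLowCost_alt iL iLCost iU iUCost iN iX aCum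
instance (iL : Int) (iLCost : Int) (iU : Int) (iUCost : Int) (iN : Int) (iX : Int) (aCum : List Int) (out : Int) : Decidable (Spec_fSearchLowCost iL iLCost iU iUCost iN iX aCum out) := by unfold Spec_fSearchLowCost; infer_instance

-- ===== CLAIM (what is proved, stated in full; the proofs are below) =====
def Claim_equal_fSearchLowCost : Prop := ∀ (iL : Int) (iLCost : Int) (iU : Int) (iUCost : Int) (iN : Int) (iX : Int) (aCum : List Int), Dom_fSearchLowCost iL iLCost iU iUCost iN iX aCum → Pre_fSearchLowCost iL iLCost iU iUCost iN iX aCum → Spec_fSearchLowCost iL iLCost iU iUCost iN iX aCum (fSearchLowCost iL iLCost iU iUCost iN iX aCum)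

-- ===== LEMMAS AND PROOFS =====

-- accumulating min over f-values equals min over the mapped list
theorem foldl_min_map (l : List Int) (f : Int → Int) (init : Int) :
    (l.map f).foldl min init = l.foldl (fun t k => min t (f k)) init := by
  induction l generalizing init with
  | nil => rfl
  | cons x xs ih => simp [List.foldl, ih]

-- A's recursion equals B's loop-then-scan whenever the bracket is already closed or iX ≥ 1
theorem core_eq (iN iX : Int) (aCum : List Int) :
    ∀ (iL iLCost iU iUCost : Int), (iU - iL ≤ iX ∨ 1 ≤ iX) →
      fSearchLowCost iL iLCost iU iUCost iN iX aCum =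
      fSearchLowCost_alt iL iLCost iU iUCost iN iX aCum := by
  intro iL iLCost iU iUCost h
  induction iL, iLCost, iU, iUCost using fSearchLowCost.induct iN iX aCum with
  | case1 iL iLCost iU iUCost hle =>
    rw [fSearchLowCost, if_pos hle]
    unfold fSearchLowCost_alt
    rw [bracketLoop, if_pos hle]
    exact (foldl_min_map _ _ _).symm
  | case2 iL iLCost iU iUCost hle iM iMCost hmid hlt ih =>
    rw [fSearchLowCost, if_neg hle]
    unfold fSearchLowCost_alt
    rw [bracketLoop, if_neg hle]
    have hmid' : iL < PySem.Int.floordiv (iU + iL) 2 ∧ PySem.Int.floordiv (iU + iL) 2 < iU := hmid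
    simp only [dif_pos hmid', if_pos hlt]
    exact ih (Or.inr (by omega))
  | case3 iL iLCost iU iUCost hle iM iMCost hmid hlt ih =>
    rw [fSearchLowCost, if_neg hle]
    unfold fSearchLowCost_alt
    rw [bracketLoop, if_neg hle]
    have hmid' : iL < PySem.Int.floordiv (iU + iL) 2 ∧ PySem.Int.floordiv (iU + iL) 2 < iU := hmid
    simp only [dif_pos hmid', if_neg hlt]
    exact ih (Or.inr (by omega))
  | case4 iL iLCost iU iUCost hle iM hmid =>
    -- guard fails: impossible under the hypothesis (iX >= 1 forces a shrinking midpoint)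
    exfalso
    have hx : 1 ≤ iX := h.resolve_left (by omega)
    have h2 : PySem.Int.floordiv (iU + iL) 2 = (iU + iL) / 2 :=
      PySem.Int.floordiv_eq_ediv_of_pos (by omega)
    simp only [iM, h2] at hmid
    omega

-- ===== VERDICT (by name: the statement is the Claim_ definition above) =====
theorem fSearchLowCost_spec : Claim_equal_fSearchLowCost := by
  intro iL iLCost iU iUCost iN iX aCum _ hpre
  unfold Spec_fSearchLowCost
  apply core_eq
  rcases hpre with ⟨h1, _⟩ | ⟨h1, _⟩
  · exact Or.inl h1
  · exact Or.inr h1
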